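-- pv_equiv track=rewrite | github.com/skerk001/clinical-rag | src/ingestion/ingest_documents.py | preprocess_clinical_text
-- ===== SOURCE A (Python) =====
-- def preprocess_clinical_text(text: str) -> str:
--     """
--     Clean and normalize clinical text while preserving medically meaningful structure.
--
--     Unlike general NLP preprocessing (which aggressively strips formatting),
--     clinical note preprocessing must preserve:
--     - Section headers (HISTORY OF PRESENT ILLNESS, ASSESSMENT AND PLAN, etc.)
--     - Medication dosing notation (e.g., "40mg PO BID")
--     - Lab value formatting (e.g., "Cr 1.7 mg/dL")
--     - Bullet/numbered lists in plans (they carry treatment priorities)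
--
--     We intentionally do NOT lowercase text because drug names, abbreviations
--     (CHF, COPD, BID, etc.), and section headers are semantically meaningful
--     in their original case.
--     """
--     # Remove excessive whitespace while preserving intentional line breaks
--     lines = text.split('\n')
--     cleaned_lines = []
--     for line in lines:
--         stripped = line.strip()
--         if stripped:  # Keep non-empty lines
--             cleaned_lines.append(stripped)
--         elif cleaned_lines and cleaned_lines[-1] != '':
--             cleaned_lines.append('')  # Preserve single blank lines (section separators)
--
--     text = '\n'.join(cleaned_lines)
--
--     # Normalize common clinical abbreviations that might confuse retrieval
--     # (but keep the abbreviations — clinicians search using them)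
--     text = text.replace('w/', 'with ')
--     text = text.replace('s/p', 'status post')
--     text = text.replace('h/o', 'history of')
--
--     return text.strip()
-- ===== SOURCE B (Python) =====
-- def preprocess_clinical_text(text: str) -> str:
--     """Stateless re-implementation: strip every line, keep a line when it is
--     non-blank or its predecessor (in the stripped list) is non-blank — this
--     collapses blank-line runs to one and drops leading blanks without any
--     look-back on the output list — then join, expand abbreviations, strip."""
--     lines = [line.strip() for line in text.split('\n')]
--     kept = [cur for prev, cur in zip([''] + lines, lines) if cur or prev]
--     result = '\n'.join(kept)
--     for old, new in (('w/', 'with '), ('s/p', 'status post'), ('h/o', 'history of')):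
--         result = result.replace(old, new)
--     return result.strip()
-- ===== Notes on version B (the rewrite author's own statement) =====
-- stated objective: simpler
-- what changed: Replaces A's stateful loop that inspects the output list's last element before appending a blank separator with a stateless zip-with-predecessor filter over the stripped lines, and folds the three replacements over a table.
import Mathlib
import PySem

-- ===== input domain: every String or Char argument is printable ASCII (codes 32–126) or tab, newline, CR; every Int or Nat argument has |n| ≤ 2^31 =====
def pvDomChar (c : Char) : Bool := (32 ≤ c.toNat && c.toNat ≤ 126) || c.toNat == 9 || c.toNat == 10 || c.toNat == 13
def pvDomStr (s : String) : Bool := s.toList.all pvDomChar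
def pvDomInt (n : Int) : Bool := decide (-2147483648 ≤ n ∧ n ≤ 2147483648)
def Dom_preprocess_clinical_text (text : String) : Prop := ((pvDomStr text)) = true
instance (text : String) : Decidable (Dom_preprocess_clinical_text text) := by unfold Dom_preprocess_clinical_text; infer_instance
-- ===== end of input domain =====

-- ===== PORT A =====
-- B replaces A's stateful look-back loop with a stateless zip-with-predecessor filter (objective: simpler); return values only, no mutation.
def preprocess_clinical_text (text : String) : String :=
  let lines := PySem.Chars.splitOn text.toList ['\n']
  let cleaned_lines := lines.foldl (fun acc line =>
    let stripped := PySem.Chars.strip line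
    if stripped ≠ [] then acc ++ [stripped]
    else if acc ≠ [] ∧ acc.getLast? ≠ some [] then acc ++ [([] : List Char)]
    else acc) []
  let t1 := PySem.Chars.join ['\n'] cleaned_lines
  let t2 := PySem.Chars.replace t1 "w/".toList "with ".toList
  let t3 := PySem.Chars.replace t2 "s/p".toList "status post".toList
  let t4 := PySem.Chars.replace t3 "h/o".toList "history of".toList
  String.ofList (PySem.Chars.strip t4)

-- ===== PORT B =====
def preprocess_clinical_text_alt (text : String) : String :=
  let lines := (PySem.Chars.splitOn text.toList ['\n']).map PySem.Chars.strip
  let kept := ((List.zip (([] : List Char) :: lines) lines).filter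
      (fun p => !p.2.isEmpty || !p.1.isEmpty)).map (·.2)
  let result := PySem.Chars.join ['\n'] kept
  let result := [("w/".toList, "with ".toList), ("s/p".toList, "status post".toList),
      ("h/o".toList, "history of".toList)].foldl
      (fun t p => PySem.Chars.replace t p.1 p.2) result
  String.ofList (PySem.Chars.strip result)

-- ===== PRECONDITION & SPEC =====
def Spec_preprocess_clinical_text (text : String) (out : String) : Prop := out = preprocess_clinical_text_alt text
instance (text : String) (out : String) : Decidable (Spec_preprocess_clinical_text text out) := by unfold Spec_preprocess_clinical_text; infer_instance

-- ===== CLAIM (what is proved, stated in full; the proofs are below) =====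
def Claim_equal_preprocess_clinical_text : Prop := ∀ (text : String), Dom_preprocess_clinical_text text → Spec_preprocess_clinical_text text (preprocess_clinical_text text)

-- ===== LEMMAS AND PROOFS =====

-- A's accumulator loop over stripped lines equals B's zip-with-predecessor filter,
-- under the invariant that "acc ends in a non-blank line" ↔ "the previous stripped line was non-blank".
theorem cleanedA_eq_keptB (ls : List (List Char)) (acc : List (List Char)) (prev : List Char)
    (hinv : (acc ≠ [] ∧ acc.getLast? ≠ some []) ↔ prev ≠ []) :
    ls.foldl (fun acc stripped =>
        if stripped ≠ [] then acc ++ [stripped]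
        else if acc ≠ [] ∧ acc.getLast? ≠ some [] then acc ++ [([] : List Char)]
        else acc) acc
    = acc ++ ((List.zip (prev :: ls) ls).filter
        (fun p => !p.2.isEmpty || !p.1.isEmpty)).map (·.2) := by
  induction ls generalizing acc prev with
  | nil => simp
  | cons h tl ih =>
    simp only [List.foldl_cons, List.zip_cons_cons, List.filter_cons]
    by_cases hh : h = []
    · subst hh
      rw [if_neg (by simp)]
      by_cases hp : prev = []
      · subst hp
        have hc : ¬(acc ≠ [] ∧ acc.getLast? ≠ some []) := fun hx => (hinv.mp hx) rfl
        rw [if_neg hc, ih acc [] hinv]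
        simp
      · rw [if_pos (hinv.mpr hp), ih (acc ++ [[]]) [] (by simp)]
        simp [hp]
    · rw [if_pos hh, ih (acc ++ [h]) h (by simp [hh])]
      simp [hh]

-- ===== VERDICT (by name: the statement is the Claim_ definition above) =====
theorem preprocess_clinical_text_spec : Claim_equal_preprocess_clinical_text := by
  intro text _
  show _ = _
  unfold preprocess_clinical_text preprocess_clinical_text_alt
  simp only [List.foldl_cons, List.foldl_nil]
  have h1 := @List.foldl_map (List Char) (List Char) (List (List Char)) PySem.Chars.strip
    (fun acc stripped =>
      if stripped ≠ [] then acc ++ [stripped]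
      else if acc ≠ [] ∧ acc.getLast? ≠ some [] then acc ++ [([] : List Char)]
      else acc)
    (PySem.Chars.splitOn text.toList ['\n']) []
  rw [← h1, cleanedA_eq_keptB _ [] [] (by simp)]
  simp
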